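-- pv_equiv track=rewrite | github.com/LeChabrax/SmallProject | Impulse-Nutrition/tools/veille_kolsquare/scripts/filter.py | classify_metiers
-- ===== SOURCE A (Python) =====
-- from typing import Dict, List, Optional, Set, Tuple
--
-- EXCLUDED_METIERS: Set[str] = {
--     "politics",
--     "actor", "fim_actor",
--     "singer", "musician", "dj",
--     "artist", "illustrator", "photographer",
--     "humorist", "animator",
--     "journalist", "speaker",
--     "chef", "food_critic", "oenologist",
--     "doctor",
--     "ceo", "management", "marketing_and_communication",
--     "fashion_designer", "hairdresser", "makeup_artist", "interior_designer",
--     "dancer",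
--     "producer",
--     "tatooist",
-- }
--
-- INCLUDED_SPORT_METIERS: Set[str] = {
--     # Fitness
--     "fitness", "fitness_athlete", "fitness_coach", "coach", "weight_lifting",
--     # Running / athlétisme
--     "running", "cross_country_running", "athletics", "other_athletics",
--     "track_race", "long_jump", "pole_vaulting",
--     # Endurance
--     "triathlon", "cycling", "mountain_biking", "swimming", "canoeying",
--     "ski_mountaineering",
--     # Combat
--     "boxing", "english_boxing", "fighting", "kickboxer", "judo",
--     # Collectifs
--     "rugby", "football", "basketball", "badminton",
--     # Outdoor
--     "adventurer", "climbing", "surfing", "skiing", "snowboard", "skateboard",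
--     "horse_riding", "windsurfing",
--     # Mécaniques
--     "moto_cross", "motocycling", "match_racing",
--     # Autres
--     "gymnastics", "artistic_gymnastics", "ice_sports", "tennis",
-- }
--
-- CONDITIONAL_METIERS: Set[str] = {
--     "blogger", "influencer_global", "youtuber", "creator", "model",
-- }
--
-- def classify_metiers(metiers: List[str]) -> Tuple[str, str]:
--     """Return (kind, reason).
--
--     kind ∈ {"include_sport", "include_conditional", "include_unknown", "exclude"}.
--     """
--     if not metiers:
--         return "include_unknown", "pas de métier renseigné"
--
--     # Any sport métier → keep
--     sport_hits = [m for m in metiers if m in INCLUDED_SPORT_METIERS or m.startswith("disabilities_")]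
--     if sport_hits:
--         return "include_sport", f"sport: {', '.join(sport_hits)}"
--
--     # Any conditional métier → keep for MCP validation
--     cond_hits = [m for m in metiers if m in CONDITIONAL_METIERS]
--     if cond_hits:
--         return "include_conditional", f"conditional: {', '.join(cond_hits)}"
--
--     # All remaining métiers must be in EXCLUDED to reject
--     unknown = [m for m in metiers if m not in EXCLUDED_METIERS]
--     if not unknown:
--         return "exclude", f"excluded: {', '.join(metiers)}"
--
--     # Mix of unknown + maybe excluded → keep as unknown for MCP
--     return "include_unknown", f"unknown: {', '.join(unknown)}"
-- ===== SOURCE B (Python) =====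
-- from typing import Dict, List, Tuple
--
-- _SPORT: List[str] = [
--     "fitness", "fitness_athlete", "fitness_coach", "coach", "weight_lifting",
--     "running", "cross_country_running", "athletics", "other_athletics",
--     "track_race", "long_jump", "pole_vaulting",
--     "triathlon", "cycling", "mountain_biking", "swimming", "canoeying",
--     "ski_mountaineering",
--     "boxing", "english_boxing", "fighting", "kickboxer", "judo",
--     "rugby", "football", "basketball", "badminton",
--     "adventurer", "climbing", "surfing", "skiing", "snowboard", "skateboard",
--     "horse_riding", "windsurfing",
--     "moto_cross", "motocycling", "match_racing",
--     "gymnastics", "artistic_gymnastics", "ice_sports", "tennis",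
-- ]
--
-- _COND: List[str] = ["blogger", "influencer_global", "youtuber", "creator", "model"]
--
-- _EXCL: List[str] = [
--     "politics",
--     "actor", "fim_actor",
--     "singer", "musician", "dj",
--     "artist", "illustrator", "photographer",
--     "humorist", "animator",
--     "journalist", "speaker",
--     "chef", "food_critic", "oenologist",
--     "doctor",
--     "ceo", "management", "marketing_and_communication",
--     "fashion_designer", "hairdresser", "makeup_artist", "interior_designer",
--     "dancer",
--     "producer",
--     "tatooist",
-- ]
--
-- # One categorisation table built once: each métier name maps to its single category.
-- CATEGORY: Dict[str, str] = {m: "sport" for m in _SPORT}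
-- CATEGORY.update({m: "conditional" for m in _COND})
-- CATEGORY.update({m: "excluded" for m in _EXCL})
--
--
-- def classify_metiers(metiers: List[str]) -> Tuple[str, str]:
--     """Return (kind, reason).
--
--     kind ∈ {"include_sport", "include_conditional", "include_unknown", "exclude"}.
--     """
--     if not metiers:
--         return "include_unknown", "pas de métier renseigné"
--
--     # One pass: look each métier up in the category table and grow the
--     # corresponding reason string directly (no intermediate lists, no join).
--     sport = cond = unknown = None
--     for m in metiers:
--         cat = "sport" if m.startswith("disabilities_") else CATEGORY.get(m, "unknown")
--         if cat == "sport":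
--             if sport is None:
--                 sport = m
--             else:
--                 sport += ", " + m
--         elif cat == "conditional":
--             if cond is None:
--                 cond = m
--             else:
--                 cond += ", " + m
--         elif cat == "unknown":
--             if unknown is None:
--                 unknown = m
--             else:
--                 unknown += ", " + m
--
--     if sport is not None:
--         return "include_sport", "sport: " + sport
--     if cond is not None:
--         return "include_conditional", "conditional: " + cond
--     if unknown is None:
--         return "exclude", "excluded: " + ", ".join(metiers)
--     return "include_unknown", "unknown: " + unknown
-- ===== Notes on version B (the rewrite author's own statement) =====
-- stated objective: alternative
-- what changed: Replaces A's three separate set-membership filters and list+join passes with one precomputed name->category dictionary consulted once per metier in a single pass that grows the joined reason strings directly, relying on the disjointness of the three sets; the same priority decision follows.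
import Mathlib
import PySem

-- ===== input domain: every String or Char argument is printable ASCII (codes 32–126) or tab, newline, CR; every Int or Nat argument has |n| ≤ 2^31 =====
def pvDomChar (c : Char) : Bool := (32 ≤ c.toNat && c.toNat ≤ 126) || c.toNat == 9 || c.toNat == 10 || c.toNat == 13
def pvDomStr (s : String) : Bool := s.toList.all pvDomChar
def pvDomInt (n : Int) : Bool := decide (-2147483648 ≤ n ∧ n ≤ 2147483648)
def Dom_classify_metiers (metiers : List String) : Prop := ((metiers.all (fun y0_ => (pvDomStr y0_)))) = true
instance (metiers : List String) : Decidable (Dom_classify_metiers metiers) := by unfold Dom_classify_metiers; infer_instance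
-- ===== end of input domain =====

-- B replaces A's three separate set-membership filters (+ list building + join) by one precomputed
-- name→category dictionary consulted once per métier in a single pass that grows the joined reason
-- strings directly; same priority decision, same strings (objective: alternative).

-- name lists (the Python module's set/dict literals, in source order)
def pvSportNames : List String :=
  ["fitness", "fitness_athlete", "fitness_coach", "coach", "weight_lifting",
   "running", "cross_country_running", "athletics", "other_athletics",
   "track_race", "long_jump", "pole_vaulting",
   "triathlon", "cycling", "mountain_biking", "swimming", "canoeying",
   "ski_mountaineering",
   "boxing", "english_boxing", "fighting", "kickboxer", "judo",
   "rugby", "football", "basketball", "badminton",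
   "adventurer", "climbing", "surfing", "skiing", "snowboard", "skateboard",
   "horse_riding", "windsurfing",
   "moto_cross", "motocycling", "match_racing",
   "gymnastics", "artistic_gymnastics", "ice_sports", "tennis"]

def pvCondNames : List String :=
  ["blogger", "influencer_global", "youtuber", "creator", "model"]

def pvExclNames : List String :=
  ["politics", "actor", "fim_actor", "singer", "musician", "dj",
   "artist", "illustrator", "photographer", "humorist", "animator",
   "journalist", "speaker", "chef", "food_critic", "oenologist", "doctor",
   "ceo", "management", "marketing_and_communication",
   "fashion_designer", "hairdresser", "makeup_artist", "interior_designer",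
   "dancer", "producer", "tatooist"]

-- ===== PORT A =====  (three sequential guarded comprehensions over the three sets, early returns)
def EXCLUDED_METIERS : PySem.Set String := PySem.Set.ofList pvExclNames
def INCLUDED_SPORT_METIERS : PySem.Set String := PySem.Set.ofList pvSportNames
def CONDITIONAL_METIERS : PySem.Set String := PySem.Set.ofList pvCondNames

def pvIsSport (m : String) : Bool :=
  PySem.Set.contains INCLUDED_SPORT_METIERS m || PySem.Str.startswith m "disabilities_"
def pvIsCond (m : String) : Bool := PySem.Set.contains CONDITIONAL_METIERS m
def pvIsUnknown (m : String) : Bool := !PySem.Set.contains EXCLUDED_METIERS m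

def classify_metiers (metiers : List String) : String × String :=
  if metiers = [] then ("include_unknown", "pas de métier renseigné")
  else
    let sport_hits := metiers.filter pvIsSport
    if sport_hits ≠ [] then
      ("include_sport", "sport: " ++ PySem.Str.join ", " sport_hits)
    else
      let cond_hits := metiers.filter pvIsCond
      if cond_hits ≠ [] then
        ("include_conditional", "conditional: " ++ PySem.Str.join ", " cond_hits)
      else
        let unknown := metiers.filter pvIsUnknown
        if unknown = [] then
          ("exclude", "excluded: " ++ PySem.Str.join ", " metiers)
        else
          ("include_unknown", "unknown: " ++ PySem.Str.join ", " unknown)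

-- ===== PORT B =====  (one category dictionary, one pass growing the reason strings)
-- CATEGORY = {m: "sport" for m in _SPORT}; CATEGORY.update(cond); CATEGORY.update(excl)
def CATEGORY : PySem.Dict String String :=
  (PySem.Dict.update
    (PySem.Dict.update (PySem.Dict.ofList (pvSportNames.map (fun m => (m, "sport"))))
      (pvCondNames.map (fun m => (m, "conditional"))))
    (pvExclNames.map (fun m => (m, "excluded"))))

def pvCat (m : String) : String :=
  if PySem.Str.startswith m "disabilities_" then "sport"
  else PySem.Dict.getD CATEGORY m "unknown"

-- 'acc = m if acc is None else acc + ", " + m'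
def pvAcc (acc : Option String) (m : String) : Option String :=
  some (match acc with | none => m | some s => s ++ ", " ++ m)

def pvStepB (st : Option String × Option String × Option String) (m : String) :
    Option String × Option String × Option String :=
  let cat := pvCat m
  if cat = "sport" then (pvAcc st.1 m, st.2.1, st.2.2)
  else if cat = "conditional" then (st.1, pvAcc st.2.1 m, st.2.2)
  else if cat = "unknown" then (st.1, st.2.1, pvAcc st.2.2 m)
  else st

def classify_metiers_alt (metiers : List String) : String × String :=
  if metiers = [] then ("include_unknown", "pas de métier renseigné")
  else
    let st := metiers.foldl pvStepB (none, none, none)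
    match st.1 with
    | some s => ("include_sport", "sport: " ++ s)
    | none =>
      match st.2.1 with
      | some s => ("include_conditional", "conditional: " ++ s)
      | none =>
        match st.2.2 with
        | none => ("exclude", "excluded: " ++ PySem.Str.join ", " metiers)
        | some s => ("include_unknown", "unknown: " ++ s)

-- ===== PRECONDITION & SPEC =====
def Spec_classify_metiers (metiers : List String) (out : String × String) : Prop := out = classify_metiers_alt metiers
instance (metiers : List String) (out : String × String) : Decidable (Spec_classify_metiers metiers out) := by unfold Spec_classify_metiers; infer_instance

-- ===== CLAIM (what is proved, stated in full; the proofs are below) =====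
def Claim_equal_classify_metiers : Prop := ∀ (metiers : List String), Dom_classify_metiers metiers → Spec_classify_metiers metiers (classify_metiers metiers)

-- ===== LEMMAS AND PROOFS =====

-- first-match lookup through a constant-valued section of a literal dict
theorem pv_get?_mk_section (names : List String) (v : String) (rest : List (String × String)) (x : String) :
    (PySem.Dict.mk (names.map (fun n => (n, v)) ++ rest)).get? x =
      if names.contains x then some v else (PySem.Dict.mk rest).get? x := by
  induction names with
  | nil => simp
  | cons n ns ih =>
    by_cases h : n = x
    · subst h
      simp [PySem.Dict.get?_mk_cons]
    · have hxn : ¬ x = n := fun hh => h hh.symm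
      simp [PySem.Dict.get?_mk_cons, hxn, h, ih]

-- the built dictionary is the literal association list of the three sections (distinct keys)
set_option maxRecDepth 20000 in
theorem pv_CATEGORY_eq :
    CATEGORY = PySem.Dict.mk
      (pvSportNames.map (fun n => (n, "sport")) ++
       (pvCondNames.map (fun n => (n, "conditional")) ++
        (pvExclNames.map (fun n => (n, "excluded")) ++ []))) := by
  decide

theorem pv_cat_eq (m : String) :
    pvCat m = if PySem.Str.startswith m "disabilities_" then "sport"
      else if pvSportNames.contains m then "sport"
      else if pvCondNames.contains m then "conditional"
      else if pvExclNames.contains m then "excluded"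
      else "unknown" := by
  unfold pvCat PySem.Dict.getD
  rw [pv_CATEGORY_eq]
  rw [pv_get?_mk_section, pv_get?_mk_section, pv_get?_mk_section]
  split_ifs <;> rfl

-- the three Python set literals ARE the name lists
set_option maxRecDepth 20000 in
theorem pv_sport_set : INCLUDED_SPORT_METIERS = pvSportNames := by decide
set_option maxRecDepth 20000 in
theorem pv_cond_set : CONDITIONAL_METIERS = pvCondNames := by decide
set_option maxRecDepth 20000 in
theorem pv_excl_set : EXCLUDED_METIERS = pvExclNames := by decide

-- a conditional métier is never a sport métier (the module's sets are disjoint)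
theorem pv_cond_not_sport (m : String) (h : pvCondNames.contains m = true) :
    PySem.Str.startswith m "disabilities_" = false ∧ pvSportNames.contains m = false := by
  simp only [pvCondNames, List.contains_cons, List.contains_nil, Bool.or_false,
    Bool.or_eq_true, beq_iff_eq] at h
  rcases h with rfl | rfl | rfl | rfl | rfl <;> exact ⟨by decide, by decide⟩

theorem pv_cat_sport (m : String) : (pvCat m = "sport") ↔ pvIsSport m = true := by
  rw [pv_cat_eq]
  unfold pvIsSport
  rw [pv_sport_set]
  simp only [PySem.Set.contains, Bool.or_eq_true]
  split_ifs with h1 h2 h3 h4 <;> simp_all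

theorem pv_cat_cond (m : String) : (pvCat m = "conditional") ↔ pvIsCond m = true := by
  rw [pv_cat_eq]
  unfold pvIsCond
  rw [pv_cond_set]
  simp only [PySem.Set.contains]
  by_cases h3 : pvCondNames.contains m = true
  · rcases pv_cond_not_sport m h3 with ⟨ha, hb⟩
    simp_all
  · simp only [Bool.not_eq_true] at h3
    split_ifs <;> simp_all

theorem pv_cat_unknown (m : String) (hs : pvCat m ≠ "sport") (hc : pvCat m ≠ "conditional") :
    (pvCat m = "unknown") ↔ pvIsUnknown m = true := by
  rw [pv_cat_eq] at hs hc ⊢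
  unfold pvIsUnknown
  rw [pv_excl_set]
  simp only [PySem.Set.contains, Bool.not_eq_eq_eq_not, Bool.not_true]
  split_ifs with h1 h2 h3 h4 <;> simp_all

-- the single-pass fold computes the three accumulated reason strings over the three category filters
theorem pv_foldl_stepB (l : List String) (a b c : Option String) :
    l.foldl pvStepB (a, b, c) =
      ((l.filter (fun m => decide (pvCat m = "sport"))).foldl pvAcc a,
       (l.filter (fun m => decide (pvCat m = "conditional"))).foldl pvAcc b,
       (l.filter (fun m => decide (pvCat m = "unknown"))).foldl pvAcc c) := by
  induction l generalizing a b c with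
  | nil => simp
  | cons m l ih =>
    simp only [List.foldl_cons, List.filter_cons, pvStepB]
    by_cases h1 : pvCat m = "sport"
    · simp [h1, ih]
    · by_cases h2 : pvCat m = "conditional"
      · simp [h2, ih]
      · by_cases h3 : pvCat m = "unknown"
        · simp [h3, ih]
        · simp [h1, h2, h3, ih]

-- string accumulation over a started accumulator
theorem pv_foldl_pvAcc_some (xs : List String) (s : String) :
    xs.foldl pvAcc (some s) = some (xs.foldl (fun a m => a ++ ", " ++ m) s) := by
  induction xs generalizing s with
  | nil => rfl
  | cons x xs ih => simp [List.foldl_cons, pvAcc, ih]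

-- joining with ", " IS left-to-right string accumulation
theorem pv_chars_join_shift (sep a b : List Char) (rest : List (List Char)) :
    PySem.Chars.join sep (a :: b :: rest) = PySem.Chars.join sep ((a ++ sep ++ b) :: rest) := by
  cases rest with
  | nil => simp [PySem.Chars.join_cons_cons, PySem.Chars.join_singleton]
  | cons c rs => simp [PySem.Chars.join_cons_cons, List.append_assoc]

theorem pv_join_eq_foldl (x : String) (xs : List String) :
    PySem.Str.join ", " (x :: xs) = xs.foldl (fun a m => a ++ ", " ++ m) x := by
  induction xs generalizing x with
  | nil => simp [PySem.Str.join, PySem.Chars.join_singleton]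
  | cons y ys ih =>
    rw [List.foldl_cons, ← ih]
    simp only [PySem.Str.join, List.map_cons]
    rw [pv_chars_join_shift]
    simp [String.toList_append]

-- none/some shape of the accumulator vs emptiness of the filter, with the joined value
theorem pv_foldl_pvAcc_none (x : String) (rest : List String) :
    (x :: rest).foldl pvAcc none = some (PySem.Str.join ", " (x :: rest)) := by
  simp only [List.foldl_cons]
  rw [show pvAcc none x = some x from rfl, pv_foldl_pvAcc_some, pv_join_eq_foldl]

-- filters by category agree with A's filters (pointwise for sport/conditional;
-- for unknown, on a list with no sport and no conditional métier)
theorem pv_filter_sport (l : List String) :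
    l.filter (fun m => decide (pvCat m = "sport")) = l.filter pvIsSport := by
  apply List.filter_congr; intro m _; simp [pv_cat_sport m]

theorem pv_filter_cond (l : List String) :
    l.filter (fun m => decide (pvCat m = "conditional")) = l.filter pvIsCond := by
  apply List.filter_congr; intro m _; simp [pv_cat_cond m]

theorem pv_filter_unknown (l : List String) (h : l.filter pvIsSport = [])
    (h' : l.filter pvIsCond = []) :
    l.filter (fun m => decide (pvCat m = "unknown")) = l.filter pvIsUnknown := by
  apply List.filter_congr; intro m hm
  have hns := List.filter_eq_nil_iff.mp h m hm
  have hnc := List.filter_eq_nil_iff.mp h' m hm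
  have hA : pvCat m ≠ "sport" := fun hq => hns ((pv_cat_sport m).mp hq)
  have hB : pvCat m ≠ "conditional" := fun hq => hnc ((pv_cat_cond m).mp hq)
  simp [pv_cat_unknown m hA hB]

-- ===== VERDICT (by name: the statement is the Claim_ definition above) =====
theorem classify_metiers_spec : Claim_equal_classify_metiers := by
  intro metiers _
  unfold Spec_classify_metiers classify_metiers classify_metiers_alt
  by_cases hnil : metiers = []
  · simp [hnil]
  · simp only [if_neg hnil]
    rw [pv_foldl_stepB, pv_filter_sport, pv_filter_cond]
    cases hx : metiers.filter pvIsSport with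
    | cons x rest =>
      rw [pv_foldl_pvAcc_none]
      simp
    | nil =>
      cases hc : metiers.filter pvIsCond with
      | cons y rest =>
        rw [pv_foldl_pvAcc_none]
        simp
      | nil =>
        rw [pv_filter_unknown metiers hx hc]
        cases hu : metiers.filter pvIsUnknown with
        | nil => simp
        | cons z rest =>
          rw [pv_foldl_pvAcc_none]
          simp
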